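-- pv_equiv track=rewrite | github.com/nimdalkr/nimdalcraft | skills/nimdalcraft/run.py | filter_candidates_for_runnable
-- ===== SOURCE A (Python) =====
-- from typing import Any
--
-- def trusted_candidate_urls(trusted_starters: list[dict[str, Any]], allowed_statuses: set[str]) -> set[str]:
--     return {
--         str(item.get("repo") or "")
--         for item in trusted_starters
--         if str(item.get("status") or "").casefold() in allowed_statuses
--     }
--
-- def filter_candidates_for_runnable(candidates: list[dict[str, Any]], trusted_starters: list[dict[str, Any]]) -> tuple[list[dict[str, Any]], str]:
--     verified = trusted_candidate_urls(trusted_starters, {"verified"})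
--     verified_candidates = [item for item in candidates if str(item.get("url") or "") in verified]
--     if verified_candidates:
--         return verified_candidates, "verified"
--     flaky = trusted_candidate_urls(trusted_starters, {"flaky"})
--     flaky_candidates = [item for item in candidates if str(item.get("url") or "") in flaky]
--     if flaky_candidates:
--         return flaky_candidates, "flaky"
--     return [], "none"
-- ===== SOURCE B (Python) =====
-- def filter_candidates_for_runnable(candidates, trusted_starters):
--     verified_urls = set()
--     flaky_urls = set()
--     for item in trusted_starters:
--         status = str(item.get("status") or "").casefold()
--         repo = str(item.get("repo") or "")
--         if status == "verified":
--             verified_urls.add(repo)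
--         elif status == "flaky":
--             flaky_urls.add(repo)
--     verified_candidates = []
--     flaky_candidates = []
--     for item in candidates:
--         url = str(item.get("url") or "")
--         if url in verified_urls:
--             verified_candidates.append(item)
--         elif url in flaky_urls:
--             flaky_candidates.append(item)
--     if verified_candidates:
--         return verified_candidates, "verified"
--     if flaky_candidates:
--         return flaky_candidates, "flaky"
--     return [], "none"
-- ===== Notes on version B (the rewrite author's own statement) =====
-- stated objective: alternative
-- what changed: A lazily builds a verified set, scans candidates, and only on failure builds a flaky set and rescans; B builds both url sets in one pass over trusted_starters and partitions candidates into verified/flaky lists in a single combined pass, choosing the result afterwards.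
import Mathlib
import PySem

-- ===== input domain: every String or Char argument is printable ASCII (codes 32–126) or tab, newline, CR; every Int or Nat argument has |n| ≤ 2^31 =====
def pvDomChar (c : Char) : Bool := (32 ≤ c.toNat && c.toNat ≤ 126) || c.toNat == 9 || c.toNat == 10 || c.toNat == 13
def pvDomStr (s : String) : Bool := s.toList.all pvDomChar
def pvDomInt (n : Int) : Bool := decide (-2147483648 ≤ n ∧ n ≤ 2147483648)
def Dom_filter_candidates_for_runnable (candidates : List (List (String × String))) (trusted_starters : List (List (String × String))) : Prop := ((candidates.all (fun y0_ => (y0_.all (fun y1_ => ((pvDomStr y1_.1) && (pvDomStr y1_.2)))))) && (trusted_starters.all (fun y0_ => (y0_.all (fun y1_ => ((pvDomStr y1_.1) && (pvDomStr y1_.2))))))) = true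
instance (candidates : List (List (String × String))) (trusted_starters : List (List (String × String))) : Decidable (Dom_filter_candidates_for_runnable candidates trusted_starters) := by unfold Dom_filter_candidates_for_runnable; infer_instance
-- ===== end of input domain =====

-- B builds both url sets in ONE pass over trusted_starters and partitions candidates in ONE
-- combined pass, instead of A's lazy two-phase build-set-then-rescan; same return value everywhere.

-- shared helper: str(item.get(k) or "") — first-match association-list lookup, "" when absent
def pvGet (d : List (String × String)) (k : String) : String :=
  ((d.find? (fun p => p.1 == k)).map Prod.snd).getD ""

-- ===== PORT A =====
-- set comprehension of trusted_candidate_urls: filter by casefolded status, collect repo strings as a set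
def trusted_candidate_urls_port (trusted_starters : List (List (String × String))) (allowed : PySem.Set String) : PySem.Set String :=
  PySem.Set.ofList ((trusted_starters.filter (fun item => PySem.Set.contains allowed (PySem.Str.lower (pvGet item "status")))).map (fun item => pvGet item "repo"))

def filter_candidates_for_runnable (candidates : List (List (String × String))) (trusted_starters : List (List (String × String))) : (List (List (String × String))) × String :=
  let verified := trusted_candidate_urls_port trusted_starters (PySem.Set.ofList ["verified"])
  let verified_candidates := candidates.filter (fun item => PySem.Set.contains verified (pvGet item "url"))
  if verified_candidates ≠ [] then (verified_candidates, "verified")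
  else
    let flaky := trusted_candidate_urls_port trusted_starters (PySem.Set.ofList ["flaky"])
    let flaky_candidates := candidates.filter (fun item => PySem.Set.contains flaky (pvGet item "url"))
    if flaky_candidates ≠ [] then (flaky_candidates, "flaky")
    else ([], "none")

-- ===== PORT B =====
def filter_candidates_for_runnable_alt (candidates : List (List (String × String))) (trusted_starters : List (List (String × String))) : (List (List (String × String))) × String :=
  let sets := trusted_starters.foldl
    (fun (acc : PySem.Set String × PySem.Set String) item =>
      let status := PySem.Str.lower (pvGet item "status")
      let repo := pvGet item "repo"
      if status == "verified" then (PySem.Set.add acc.1 repo, acc.2)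
      else if status == "flaky" then (acc.1, PySem.Set.add acc.2 repo)
      else acc)
    (PySem.Set.empty, PySem.Set.empty)
  let parts := candidates.foldl
    (fun (acc : List (List (String × String)) × List (List (String × String))) item =>
      let url := pvGet item "url"
      if PySem.Set.contains sets.1 url then (acc.1 ++ [item], acc.2)
      else if PySem.Set.contains sets.2 url then (acc.1, acc.2 ++ [item])
      else acc)
    ([], [])
  if parts.1 ≠ [] then (parts.1, "verified")
  else if parts.2 ≠ [] then (parts.2, "flaky")
  else ([], "none")

-- ===== PRECONDITION & SPEC =====
def Spec_filter_candidates_for_runnable (candidates : List (List (String × String))) (trusted_starters : List (List (String × String))) (out : (List (List (String × String))) × String) : Prop := out = filter_candidates_for_runnable_alt candidates trusted_starters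
instance (candidates : List (List (String × String))) (trusted_starters : List (List (String × String))) (out : (List (List (String × String))) × String) : Decidable (Spec_filter_candidates_for_runnable candidates trusted_starters out) := by unfold Spec_filter_candidates_for_runnable; infer_instance

-- ===== CLAIM (what is proved, stated in full; the proofs are below) =====
def Claim_equal_filter_candidates_for_runnable : Prop := ∀ (candidates : List (List (String × String))) (trusted_starters : List (List (String × String))), Dom_filter_candidates_for_runnable candidates trusted_starters → Spec_filter_candidates_for_runnable candidates trusted_starters (filter_candidates_for_runnable candidates trusted_starters)

-- ===== LEMMAS AND PROOFS =====

-- B's one-pass set builder = A's two filtered set comprehensions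
theorem b_sets_eq (ts : List (List (String × String))) (vs fs : PySem.Set String) :
    ts.foldl
      (fun (acc : PySem.Set String × PySem.Set String) item =>
        let status := PySem.Str.lower (pvGet item "status")
        let repo := pvGet item "repo"
        if status == "verified" then (PySem.Set.add acc.1 repo, acc.2)
        else if status == "flaky" then (acc.1, PySem.Set.add acc.2 repo)
        else acc)
      (vs, fs)
    = ((ts.filter (fun item => PySem.Str.lower (pvGet item "status") == "verified")).foldl
         (fun s item => PySem.Set.add s (pvGet item "repo")) vs,
       (ts.filter (fun item => PySem.Str.lower (pvGet item "status") == "flaky")).foldl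
         (fun s item => PySem.Set.add s (pvGet item "repo")) fs) := by
  induction ts generalizing vs fs with
  | nil => rfl
  | cons h t ih =>
    simp only [List.foldl_cons, List.filter_cons]
    by_cases hv : (PySem.Str.lower (pvGet h "status") == "verified") = true
    · have hf : ¬ (PySem.Str.lower (pvGet h "status") == "flaky") = true := by
        rw [eq_of_beq hv]; decide
      rw [if_pos hv, if_pos hv, if_neg hf, List.foldl_cons]
      exact ih _ _
    · by_cases hf : (PySem.Str.lower (pvGet h "status") == "flaky") = true
      · rw [if_neg hv, if_neg hv, if_pos hf, if_pos hf, List.foldl_cons]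
        exact ih _ _
      · rw [if_neg hv, if_neg hv, if_neg hf, if_neg hf]
        exact ih _ _

-- membership in the singleton allowed-status set is equality with that status
theorem contains_singleton (x y : String) :
    PySem.Set.contains (PySem.Set.ofList [y]) x = (x == y) := by
  have h1 : PySem.Set.ofList [y] = [y] := rfl
  rw [PySem.Set.contains, h1, List.contains_cons]
  simp

-- A's set comprehension as a foldl of adds
theorem a_set_eq (ts : List (List (String × String))) (st : String) :
    trusted_candidate_urls_port ts (PySem.Set.ofList [st])
    = (ts.filter (fun item => PySem.Str.lower (pvGet item "status") == st)).foldl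
        (fun s item => PySem.Set.add s (pvGet item "repo")) PySem.Set.empty := by
  unfold trusted_candidate_urls_port
  simp only [contains_singleton]
  rw [PySem.Set.ofList_eq_foldl, List.foldl_map]
  rfl

-- B's one-pass partition of candidates = two appended filters
theorem b_parts_eq (c : List (List (String × String))) (v f : PySem.Set String)
    (vc fc : List (List (String × String))) :
    c.foldl
      (fun (acc : List (List (String × String)) × List (List (String × String))) item =>
        let url := pvGet item "url"
        if PySem.Set.contains v url then (acc.1 ++ [item], acc.2)
        else if PySem.Set.contains f url then (acc.1, acc.2 ++ [item])
        else acc)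
      (vc, fc)
    = (vc ++ c.filter (fun item => PySem.Set.contains v (pvGet item "url")),
       fc ++ c.filter (fun item => !PySem.Set.contains v (pvGet item "url")
                                   && PySem.Set.contains f (pvGet item "url"))) := by
  induction c generalizing vc fc with
  | nil => simp
  | cons h t ih =>
    simp only [List.foldl_cons, List.filter_cons]
    by_cases hv : PySem.Set.contains v (pvGet h "url") = true
    · have hcomp : ¬ (!PySem.Set.contains v (pvGet h "url")
          && PySem.Set.contains f (pvGet h "url")) = true := by
        rw [hv]; simp
      rw [if_pos hv, if_pos hv, if_neg hcomp, ih]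
      simp
    · have hv' : PySem.Set.contains v (pvGet h "url") = false := by
        simpa using hv
      by_cases hf : PySem.Set.contains f (pvGet h "url") = true
      · have hcomp : (!PySem.Set.contains v (pvGet h "url")
            && PySem.Set.contains f (pvGet h "url")) = true := by
          rw [hv', hf]; rfl
        rw [if_neg hv, if_neg hv, if_pos hf, if_pos hcomp, ih]
        simp
      · have hf' : PySem.Set.contains f (pvGet h "url") = false := by
          simpa using hf
        have hcomp : ¬ (!PySem.Set.contains v (pvGet h "url")
            && PySem.Set.contains f (pvGet h "url")) = true := by
          rw [hv', hf']; simp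
        rw [if_neg hv, if_neg hv, if_neg hf, if_neg hcomp]
        exact ih _ _

-- when no candidate is verified, B's elif-filter equals A's plain flaky filter
theorem flaky_filter_eq (c : List (List (String × String))) (v f : PySem.Set String)
    (hnil : c.filter (fun item => PySem.Set.contains v (pvGet item "url")) = []) :
    c.filter (fun item => !PySem.Set.contains v (pvGet item "url")
                          && PySem.Set.contains f (pvGet item "url"))
    = c.filter (fun item => PySem.Set.contains f (pvGet item "url")) := by
  apply List.filter_congr
  intro x hx
  have := List.filter_eq_nil_iff.mp hnil x hx
  simp_all

-- ===== VERDICT (by name: the statement is the Claim_ definition above) =====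
theorem filter_candidates_for_runnable_spec : Claim_equal_filter_candidates_for_runnable := by
  intro c ts _
  unfold Spec_filter_candidates_for_runnable
  unfold filter_candidates_for_runnable filter_candidates_for_runnable_alt
  simp only [b_sets_eq, b_parts_eq, List.nil_append, a_set_eq]
  by_cases hv : c.filter (fun item => PySem.Set.contains
      ((ts.filter (fun item => PySem.Str.lower (pvGet item "status") == "verified")).foldl
        (fun s item => PySem.Set.add s (pvGet item "repo")) PySem.Set.empty) (pvGet item "url")) = []
  · rw [flaky_filter_eq _ _ _ hv, if_neg (not_not_intro hv)]
  · rw [if_pos hv, if_pos hv]
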